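-- pv_equiv track=rewrite | github.com/SourabhSaraswat-191939/6Companies30days | Goldman Sachs/Goldman Sachs Q9.py | printMinNumberForPattern
-- ===== SOURCE A (Python) =====
-- def printMinNumberForPattern(Str):
--     stack = []
--     result = ''
--     largest = 1
--     # if Str[0]=='I':
--     #     largest += 1
--     #     result += str(largest)
--     # else:
--     #     largest += 1
--     #     stack.append(largest)
--
--     for char in Str:
--         if char=='I':
--             stack.append(largest)
--             largest += 1
--             while stack:
--                 result += str(stack.pop())
--
--         else:
--             stack.append(largest)
--             largest+=1
--
--     stack.append(largest)
--     while stack: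
--         result += str(stack.pop())
--     return int(result)
-- ===== SOURCE B (Python) =====
-- def printMinNumberForPattern(Str):
--     n = len(Str)
--     # distance from position k to the next 'I' (or the end) at or after k
--     nxt = [0] * (n + 1)
--     for k in range(n - 1, -1, -1):
--         nxt[k] = 0 if Str[k] == 'I' else nxt[k + 1] + 1
--     pieces = []
--     prev = 0  # distance from position k back to the previous 'I' (or the start)
--     for k in range(n + 1):
--         pieces.append(str(k + nxt[k] - prev + 1))
--         if k < n:
--             prev = 0 if Str[k] == 'I' else prev + 1
--     return int(''.join(pieces))
-- ===== Notes on version B (the rewrite author's own statement) =====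
-- stated objective: alternative
-- what changed: Replaced A's push/flush stack simulation with a closed-form per-position digit (k + distance-to-next-'I' - distance-from-previous-'I' + 1) computed by one backward and one forward linear pass.
import Mathlib
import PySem

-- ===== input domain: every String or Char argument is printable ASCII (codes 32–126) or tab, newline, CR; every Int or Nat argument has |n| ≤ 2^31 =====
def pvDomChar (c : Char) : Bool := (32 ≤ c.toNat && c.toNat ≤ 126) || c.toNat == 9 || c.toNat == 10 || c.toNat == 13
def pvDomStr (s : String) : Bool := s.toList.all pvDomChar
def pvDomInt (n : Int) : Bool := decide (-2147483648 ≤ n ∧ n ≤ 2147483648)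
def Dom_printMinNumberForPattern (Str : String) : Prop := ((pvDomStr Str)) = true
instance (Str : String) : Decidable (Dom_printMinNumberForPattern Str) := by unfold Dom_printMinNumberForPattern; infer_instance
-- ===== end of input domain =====

-- B replaces A's push/flush stack simulation by a closed-form per-position digit
-- (k + distance-to-next-'I' − distance-from-previous-'I' + 1) computed in two linear passes (objective: alternative).

-- ===== PORT A =====
-- Python's stack (append/pop at the right end) is represented with its TOP at the list HEAD.
-- 'while stack: result += str(stack.pop())'
def popAllA : List Int → String → String
  | [], res => res
  | top :: rest, res => popAllA rest (res ++ PySem.Int.toStr top)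

-- the body of 'for char in Str', state = (stack, result, largest)
def stepA (st : List Int × String × Int) (c : Char) : List Int × String × Int :=
  if c = 'I' then
    ([], popAllA (st.2.2 :: st.1) st.2.1, st.2.2 + 1)
  else
    (st.2.2 :: st.1, st.2.1, st.2.2 + 1)

def printMinNumberForPattern (Str : String) : Int :=
  let st := Str.toList.foldl stepA ([], "", 1)
  let result := popAllA (st.2.2 :: st.1) st.2.1
  -- int(result); result is always a nonempty digit string, so ofStr? always succeeds
  (PySem.Int.ofStr? result).getD 0

-- ===== PORT B =====
-- backward pass: nxt[k] = 0 if Str[k]=='I' else nxt[k+1]+1, with nxt[n] = 0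
def nxtListB : List Char → List Int
  | [] => [0]
  | c :: cs =>
      let rest := nxtListB cs
      (if c = 'I' then 0 else rest.headD 0 + 1) :: rest

-- forward pass: pieces.append(str(k + nxt[k] - prev + 1)); prev updated from Str[k]
def piecesB : List Char → List Int → Int → Int → List String
  | [], nxts, k, prev => [PySem.Int.toStr (k + nxts.headD 0 - prev + 1)]
  | c :: cs, nxts, k, prev =>
      PySem.Int.toStr (k + nxts.headD 0 - prev + 1) ::
        piecesB cs nxts.tail (k + 1) (if c = 'I' then 0 else prev + 1)

def printMinNumberForPattern_alt (Str : String) : Int :=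
  (PySem.Int.ofStr? (String.join (piecesB Str.toList (nxtListB Str.toList) 0 0))).getD 0

-- ===== PRECONDITION & SPEC =====
def Spec_printMinNumberForPattern (Str : String) (out : Int) : Prop := out = printMinNumberForPattern_alt Str
instance (Str : String) (out : Int) : Decidable (Spec_printMinNumberForPattern Str out) := by unfold Spec_printMinNumberForPattern; infer_instance

-- ===== CLAIM (what is proved, stated in full; the proofs are below) =====
def Claim_equal_printMinNumberForPattern : Prop := ∀ (Str : String), Dom_printMinNumberForPattern Str → Spec_printMinNumberForPattern Str (printMinNumberForPattern Str)

-- ===== LEMMAS AND PROOFS =====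

theorem joinCons (x : String) (l : List String) : String.join (x :: l) = x ++ String.join l := by
  simp [String.join]
  induction l generalizing x with
  | nil => simp
  | cons y l ih => simp [List.foldl_cons, ih (x ++ y), ih y, String.append_assoc]

theorem joinAppend (a b : List String) : String.join (a ++ b) = String.join a ++ String.join b := by
  induction a with
  | nil => simp [String.join]
  | cons x a ih => simp [joinCons, ih, String.append_assoc]

-- value-level view of A's remaining output: runAV cs stack l = the numbers still to be emitted
def runAV : List Char → List Int → Int → List Int
  | [], stack, l => l :: stack
  | c :: cs, stack, l =>
      if c = 'I' then (l :: stack) ++ runAV cs [] (l + 1)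
      else runAV cs (l :: stack) (l + 1)

-- value-level view of B's remaining pieces
def bvalsV : List Char → List Int → Int → Int → List Int
  | [], nxts, k, prev => [k + nxts.headD 0 - prev + 1]
  | c :: cs, nxts, k, prev =>
      (k + nxts.headD 0 - prev + 1) ::
        bvalsV cs nxts.tail (k + 1) (if c = 'I' then 0 else prev + 1)

def descList (k t : Nat) : List Int := (List.range t).map (fun (i : Nat) => (k : Int) - (i : Int))

def pendList (k t : Nat) (nx : Int) : List Int :=
  (List.range t).map (fun (i : Nat) => (k : Int) + nx + 1 - (i : Int))

theorem piecesB_eq_map (cs : List Char) : ∀ nxts k prev,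
    piecesB cs nxts k prev = (bvalsV cs nxts k prev).map PySem.Int.toStr := by
  induction cs with
  | nil => intro nxts k prev; simp [piecesB, bvalsV]
  | cons c cs ih => intro nxts k prev; simp [piecesB, bvalsV, ih]

theorem popAllA_eq (stack : List Int) : ∀ res,
    popAllA stack res = res ++ String.join (stack.map PySem.Int.toStr) := by
  induction stack with
  | nil => intro res; simp [popAllA, String.join]
  | cons a rest ih => intro res; simp [popAllA, ih, joinCons, String.append_assoc]

-- A's whole output string, from any intermediate state
theorem foldA_eq (cs : List Char) : ∀ stack res l,
    popAllA ((cs.foldl stepA (stack, res, l)).2.2 :: (cs.foldl stepA (stack, res, l)).1)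
        (cs.foldl stepA (stack, res, l)).2.1 =
      res ++ String.join ((runAV cs stack l).map PySem.Int.toStr) := by
  induction cs with
  | nil => intro stack res l; simp [runAV, popAllA_eq]
  | cons c cs ih =>
      intro stack res l
      by_cases h : c = 'I' <;>
        simp [stepA, h, runAV, ih, popAllA_eq, joinCons, joinAppend, String.append_assoc]

theorem descList_succ (k t : Nat) :
    ((k : Int) + 1) :: descList k t = descList (k + 1) (t + 1) := by
  apply List.ext_getElem
  · simp [descList]
  · intro i h1 h2
    rcases i with _ | j
    · simp [descList]
    · simp only [descList, List.getElem_cons_succ, List.getElem_map, List.getElem_range]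
      simp [descList] at h1
      omega

theorem pendList_succ (k t : Nat) (nx : Int) :
    pendList k t (nx + 1) ++ [(k : Int) + nx + 2 - t] = pendList (k + 1) (t + 1) nx := by
  unfold pendList
  rw [List.range_succ, List.map_append]
  congr 1
  · apply List.map_congr_left; intro i _; push_cast; ring
  · simp only [List.map_cons, List.map_nil, List.cons.injEq, and_true]
    push_cast; ring

theorem flushEq (k t : Nat) :
    ((k : Int) + 1) :: descList k t = pendList k t 0 ++ [(k : Int) - t + 1] := by
  have hL : ((k : Int) + 1) :: descList k t
      = (List.range (t + 1)).map (fun (i : Nat) => (k : Int) + 1 - (i : Int)) := by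
    apply List.ext_getElem
    · simp [descList]
    · intro i h1 h2
      rcases i with _ | j
      · simp
      · simp only [descList, List.getElem_cons_succ, List.getElem_map, List.getElem_range]
        omega
  have hR : pendList k t 0 ++ [(k : Int) - t + 1]
      = (List.range (t + 1)).map (fun (i : Nat) => (k : Int) + 1 - (i : Int)) := by
    rw [List.range_succ, List.map_append]
    congr 1
    simp only [List.map_cons, List.map_nil, List.cons.injEq, and_true]
    ring
  rw [hL, hR]

-- main correspondence: A's flush-based emission = B's pending pieces + per-position pieces
theorem mainM (cs : List Char) : ∀ (k t : Nat),
    runAV cs (descList k t) ((k : Int) + 1) =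
      pendList k t ((nxtListB cs).headD 0) ++ bvalsV cs (nxtListB cs) k t := by
  induction cs with
  | nil =>
      intro k t
      simp only [runAV, nxtListB, bvalsV, List.headD_cons]
      rw [flushEq]
      norm_num
  | cons c cs ih =>
      intro k t
      by_cases h : c = 'I'
      · have hih := ih (k + 1) 0
        simp only [descList, pendList, List.range_zero, List.map_nil, List.nil_append,
          Nat.cast_add, Nat.cast_one] at hih
        simp only [runAV, nxtListB, bvalsV, h, List.headD_cons, List.tail_cons, if_true]
        rw [hih, flushEq]
        simp [List.append_assoc]
      · have hih := ih (k + 1) (t + 1)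
        simp only [Nat.cast_add, Nat.cast_one] at hih
        simp only [runAV, nxtListB, bvalsV, h, List.headD_cons, List.tail_cons, if_false]
        rw [descList_succ, hih, ← pendList_succ]
        simp only [List.append_assoc, List.singleton_append]
        generalize (nxtListB cs).headD 0 = nx
        congr 2
        ring

-- ===== VERDICT (by name: the statement is the Claim_ definition above) =====
theorem printMinNumberForPattern_spec : Claim_equal_printMinNumberForPattern := by
  intro Str _
  show printMinNumberForPattern Str = printMinNumberForPattern_alt Str
  unfold printMinNumberForPattern printMinNumberForPattern_alt
  show (PySem.Int.ofStr?
      (popAllA ((Str.toList.foldl stepA ([], "", 1)).2.2 :: (Str.toList.foldl stepA ([], "", 1)).1)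
        (Str.toList.foldl stepA ([], "", 1)).2.1)).getD 0 = _
  have h1 := foldA_eq Str.toList [] "" 1
  have h2 := mainM Str.toList 0 0
  simp only [descList, pendList, List.range_zero, List.map_nil, List.nil_append,
    Nat.cast_zero, zero_add] at h2
  rw [h1, h2, piecesB_eq_map]
  simp
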